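-- pv_equiv track=rewrite | github.com/shan2312/DSA-Python-Solutions | Dynamic Programming/Q2_Algoexpert_maximum_sum.py | get_maximum_sum_from_ith_index
-- ===== SOURCE A (Python) =====
-- def get_maximum_sum_from_ith_index(array, start_index, dp_cache):
--     if start_index >= len(array):
--         return 0
--
--     if start_index in dp_cache:
--         return dp_cache[start_index]
--
--     # Consider start index
--     first_max = get_maximum_sum_from_ith_index(array, start_index + 2,dp_cache)
--     first_max += array[start_index]
--
--     # Do not Consider start index
--     second_max = get_maximum_sum_from_ith_index(array, start_index + 1, dp_cache)
--
--     dp_cache[start_index] = max(first_max, second_max)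
--     return dp_cache[start_index]
-- ===== SOURCE B (Python) =====
-- def get_maximum_sum_from_ith_index(array, start_index, dp_cache):
--     n = len(array)
--     if start_index >= n:
--         return 0
--     if start_index in dp_cache:
--         return dp_cache[start_index]
--     for i in range(n - 1, start_index - 1, -1):
--         if i not in dp_cache:
--             take = array[i] + (dp_cache[i + 2] if i + 2 < n else 0)
--             skip = dp_cache[i + 1] if i + 1 < n else 0
--             dp_cache[i] = max(take, skip)
--     return dp_cache[start_index]
-- ===== Notes on version B (the rewrite author's own statement) =====
-- stated objective: alternative
-- what changed: Top-down memoized recursion is replaced by a bottom-up iterative DP loop that fills the same dp_cache from the end of the array down to start_index.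
import Mathlib
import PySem

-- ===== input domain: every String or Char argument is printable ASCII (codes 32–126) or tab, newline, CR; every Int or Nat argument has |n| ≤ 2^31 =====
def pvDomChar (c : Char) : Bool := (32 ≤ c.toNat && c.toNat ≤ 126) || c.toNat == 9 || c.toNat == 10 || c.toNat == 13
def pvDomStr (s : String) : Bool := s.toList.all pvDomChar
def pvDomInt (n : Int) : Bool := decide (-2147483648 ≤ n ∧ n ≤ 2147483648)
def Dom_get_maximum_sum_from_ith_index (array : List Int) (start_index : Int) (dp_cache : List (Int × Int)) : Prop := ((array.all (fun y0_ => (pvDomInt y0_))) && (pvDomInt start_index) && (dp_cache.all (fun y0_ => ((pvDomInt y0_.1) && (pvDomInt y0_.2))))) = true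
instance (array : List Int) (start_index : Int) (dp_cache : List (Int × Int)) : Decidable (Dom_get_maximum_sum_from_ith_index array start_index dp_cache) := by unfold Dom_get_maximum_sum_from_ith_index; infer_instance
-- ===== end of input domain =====

-- B replaces A's top-down memoized recursion by a bottom-up iterative fill of the same cache (alternative
-- decomposition; same O(n) cost). Both Pythons mutate dp_cache; the equivalence proved here is about the
-- RETURN value only (on a pre-populated cache the set of entries B adds can differ from A's).

-- ===== PORT A =====
-- A's recursion, threading the mutable dp_cache as explicit state (returns value and updated cache).
-- `fuel` only makes the recursion structural; the entry point passes enough fuel that 0 is never reached.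
def pvGoA (array : List Int) (fuel : Nat) (i : Int) (c : PySem.Dict Int Int) : Int × PySem.Dict Int Int :=
  match fuel with
  | 0 => (0, c)
  | fuel + 1 =>
    if (array.length : Int) ≤ i then (0, c)
    else
      match c.get? i with
      | some v => (v, c)
      | none =>
        -- first_max = f(i+2) + array[i]
        let r2 := pvGoA array fuel (i + 2) c
        let first_max := r2.1 + (PySem.List.pyGet? array i).getD 0
        -- second_max = f(i+1)
        let r1 := pvGoA array fuel (i + 1) r2.2
        let m := max first_max r1.1
        (m, r1.2.insert i m)

def get_maximum_sum_from_ith_index (array : List Int) (start_index : Int) (dp_cache : List (Int × Int)) : Int :=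
  (pvGoA array (((array.length : Int) - start_index).toNat + 1) start_index (PySem.Dict.mk dp_cache)).1

-- ===== PORT B =====
-- one iteration of B's `for i in range(n-1, start_index-1, -1)` body
def pvStepB (array : List Int) (n : Int) (d : PySem.Dict Int Int) (i : Int) : PySem.Dict Int Int :=
  if (d.get? i).isSome then d
  else
    let take := (PySem.List.pyGet? array i).getD 0 + (if i + 2 < n then (d.get? (i + 2)).getD 0 else 0)
    let skip := if i + 1 < n then (d.get? (i + 1)).getD 0 else 0
    d.insert i (max take skip)

-- B's for-loop, descending from i down to start_index (fuel = the number of iterations, supplied exactly)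
def pvFillB (array : List Int) (n start : Int) (fuel : Nat) (i : Int) (d : PySem.Dict Int Int) : PySem.Dict Int Int :=
  match fuel with
  | 0 => d
  | fuel + 1 =>
    if i ≤ start - 1 then d
    else pvFillB array n start fuel (i - 1) (pvStepB array n d i)

def get_maximum_sum_from_ith_index_alt (array : List Int) (start_index : Int) (dp_cache : List (Int × Int)) : Int :=
  let n : Int := array.length
  if n ≤ start_index then 0
  else
    match (PySem.Dict.mk dp_cache).get? start_index with
    | some v => v
    | none =>
      let d := pvFillB array n start_index (n - start_index).toNat (n - 1) (PySem.Dict.mk dp_cache)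
      (d.get? start_index).getD 0

-- ===== PRECONDITION & SPEC =====
-- Pre_ excludes exactly the inputs on which the Python A raises IndexError: a start_index below
-- -len(array) that is not itself a cache key (there A evaluates array[start_index] out of range).
def Pre_get_maximum_sum_from_ith_index (array : List Int) (start_index : Int) (dp_cache : List (Int × Int)) : Prop :=
  -(array.length : Int) ≤ start_index ∨ ((PySem.Dict.mk dp_cache).get? start_index).isSome = true
instance (array : List Int) (start_index : Int) (dp_cache : List (Int × Int)) : Decidable (Pre_get_maximum_sum_from_ith_index array start_index dp_cache) := by unfold Pre_get_maximum_sum_from_ith_index; infer_instance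

def pvWitness_get_maximum_sum_from_ith_index : List Int × Int × (List (Int × Int)) := ([], 0, [])

def Spec_get_maximum_sum_from_ith_index (array : List Int) (start_index : Int) (dp_cache : List (Int × Int)) (out : Int) : Prop := out = get_maximum_sum_from_ith_index_alt array start_index dp_cache
instance (array : List Int) (start_index : Int) (dp_cache : List (Int × Int)) (out : Int) : Decidable (Spec_get_maximum_sum_from_ith_index array start_index dp_cache out) := by unfold Spec_get_maximum_sum_from_ith_index; infer_instance

-- ===== CLAIM (what is proved, stated in full; the proofs are below) =====
def Claim_equal_get_maximum_sum_from_ith_index : Prop := ∀ (array : List Int) (start_index : Int) (dp_cache : List (Int × Int)), Dom_get_maximum_sum_from_ith_index array start_index dp_cache → Pre_get_maximum_sum_from_ith_index array start_index dp_cache → Spec_get_maximum_sum_from_ith_index array start_index dp_cache (get_maximum_sum_from_ith_index array start_index dp_cache)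

-- ===== LEMMAS AND PROOFS =====

-- The mathematical value both programs compute: memoized non-adjacent max sum from index i,
-- where entries of the INITIAL cache c0 (at indices < n) are taken as given.
def pvV (array : List Int) (c0 : PySem.Dict Int Int) (fuel : Nat) (i : Int) : Int :=
  match fuel with
  | 0 => 0
  | fuel + 1 =>
    if (array.length : Int) ≤ i then 0
    else
      match c0.get? i with
      | some v => v
      | none => max ((pvV array c0 fuel (i + 2)) + (PySem.List.pyGet? array i).getD 0) (pvV array c0 fuel (i + 1))

theorem pvV_irrel (array : List Int) (c0 : PySem.Dict Int Int) :
    ∀ (f g : Nat) (i : Int), ((array.length : Int) - i).toNat < f → ((array.length : Int) - i).toNat < g →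
      pvV array c0 f i = pvV array c0 g i := by
  intro f
  induction f with
  | zero => intro g i hf _; omega
  | succ f ih =>
    intro g i hf hg
    match g with
    | 0 => omega
    | g + 1 =>
      show pvV array c0 (f + 1) i = pvV array c0 (g + 1) i
      rw [pvV, pvV]
      by_cases hlen : (array.length : Int) ≤ i
      · rw [if_pos hlen, if_pos hlen]
      · rw [if_neg hlen, if_neg hlen]
        cases hc : c0.get? i with
        | some v => rfl
        | none =>
          have e2 := ih g (i + 2) (by omega) (by omega)
          have e1 := ih g (i + 1) (by omega) (by omega)
          rw [e2, e1]

-- the canonical (fuel-free) value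
def pvVC (array : List Int) (c0 : PySem.Dict Int Int) (i : Int) : Int :=
  pvV array c0 (((array.length : Int) - i).toNat + 1) i

theorem pvVC_ge (array : List Int) (c0 : PySem.Dict Int Int) (i : Int)
    (h : (array.length : Int) ≤ i) : pvVC array c0 i = 0 := by
  unfold pvVC; rw [pvV, if_pos h]

theorem pvVC_cached (array : List Int) (c0 : PySem.Dict Int Int) (i : Int) (v : Int)
    (hlen : ¬ (array.length : Int) ≤ i) (hc : c0.get? i = some v) : pvVC array c0 i = v := by
  unfold pvVC; rw [pvV, if_neg hlen, hc]

theorem pvVC_eq (array : List Int) (c0 : PySem.Dict Int Int) (i : Int)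
    (hlen : ¬ (array.length : Int) ≤ i) (hc : c0.get? i = none) :
    pvVC array c0 i =
      max ((pvVC array c0 (i + 2)) + (PySem.List.pyGet? array i).getD 0) (pvVC array c0 (i + 1)) := by
  unfold pvVC
  rw [pvV, if_neg hlen, hc,
    pvV_irrel array c0 (((array.length : Int) - i).toNat) (((array.length : Int) - (i + 2)).toNat + 1) (i + 2) (by omega) (by omega),
    pvV_irrel array c0 (((array.length : Int) - i).toNat) (((array.length : Int) - (i + 1)).toNat + 1) (i + 1) (by omega) (by omega)]

-- invariant carried by A's cache: every entry at an index < n holds the pvVC value,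
-- and every entry of the initial cache is still present unchanged.
def pvInv (array : List Int) (c0 c : PySem.Dict Int Int) : Prop :=
  (∀ j v, j < (array.length : Int) → c.get? j = some v → v = pvVC array c0 j) ∧
  (∀ j v, c0.get? j = some v → c.get? j = some v)

theorem pvInv_init (array : List Int) (c0 : PySem.Dict Int Int) : pvInv array c0 c0 := by
  constructor
  · intro j v hj hv
    rw [pvVC_cached array c0 j v (by omega) hv]
  · intro j v hv; exact hv

theorem pvGoA_correct (array : List Int) (c0 : PySem.Dict Int Int) :
    ∀ (fuel : Nat) (i : Int) (c : PySem.Dict Int Int),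
      ((array.length : Int) - i).toNat < fuel → pvInv array c0 c →
      (pvGoA array fuel i c).1 = pvVC array c0 i ∧ pvInv array c0 (pvGoA array fuel i c).2 := by
  intro fuel
  induction fuel with
  | zero => intro i c hf _; omega
  | succ fuel ih =>
    intro i c hf h
    show (pvGoA array (fuel + 1) i c).1 = _ ∧ _
    rw [pvGoA]
    by_cases hlen : (array.length : Int) ≤ i
    · rw [if_pos hlen]
      exact ⟨(pvVC_ge array c0 i hlen).symm, h⟩
    · rw [if_neg hlen]
      cases hc : c.get? i with
      | some v =>
        exact ⟨h.1 i v (by omega) hc, h⟩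
      | none =>
        have h2 := ih (i + 2) c (by omega) h
        have h1 := ih (i + 1) (pvGoA array fuel (i + 2) c).2 (by omega) h2.2
        have hc0 : c0.get? i = none := by
          cases hc0' : c0.get? i with
          | none => rfl
          | some w => rw [h.2 i w hc0'] at hc; cases hc
        have hVi := pvVC_eq array c0 i hlen hc0
        constructor
        · simp only [h1.1, h2.1, hVi]
        · constructor
          · intro j v hj hv
            rw [PySem.Dict.get?_insert] at hv
            by_cases hji : j = i
            · rw [if_pos hji] at hv
              cases hv
              rw [hji, hVi, h1.1, h2.1]
            · rw [if_neg hji] at hv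
              exact h1.2.1 j v hj hv
          · intro j v hv
            rw [PySem.Dict.get?_insert]
            by_cases hji : j = i
            · rw [hji] at hv; rw [hv] at hc0; cases hc0
            · rw [if_neg hji]
              exact h1.2.2 j v hv

-- B's loop invariant: after processing indices i+1 … n-1, the dict holds pvVC at those indices and
-- the original cache everywhere else.
theorem pvFillB_correct (array : List Int) (c0 : PySem.Dict Int Int) (start : Int) :
    ∀ (fuel : Nat) (i : Int) (d : PySem.Dict Int Int), start - 1 ≤ i → i < (array.length : Int) →
      (i - (start - 1)).toNat ≤ fuel →
      (∀ j, d.get? j = if i + 1 ≤ j ∧ j < (array.length : Int) then some (pvVC array c0 j) else c0.get? j) →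
      (∀ j, (pvFillB array (array.length : Int) start fuel i d).get? j =
        if start ≤ j ∧ j < (array.length : Int) then some (pvVC array c0 j) else c0.get? j) := by
  intro fuel
  induction fuel with
  | zero =>
    intro i d hlo hhi hfuel hd j
    show d.get? j = _
    rw [hd j]
    have heq : (i + 1 ≤ j ∧ j < (array.length : Int)) ↔ (start ≤ j ∧ j < (array.length : Int)) := by
      constructor <;> (intro hp; exact ⟨by omega, hp.2⟩)
    rw [if_congr heq rfl rfl]
  | succ fuel ih =>
    intro i d hlo hhi hfuel hd
    show ∀ j, (pvFillB array (array.length : Int) start (fuel + 1) i d).get? j = _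
    rw [pvFillB]
    by_cases hbase : i ≤ start - 1
    · rw [if_pos hbase]
      intro j
      rw [hd j]
      have heq : (i + 1 ≤ j ∧ j < (array.length : Int)) ↔ (start ≤ j ∧ j < (array.length : Int)) := by
        constructor <;> (intro hp; exact ⟨by omega, hp.2⟩)
      rw [if_congr heq rfl rfl]
    · rw [if_neg hbase]
      have hstep : ∀ j, (pvStepB array (array.length : Int) d i).get? j =
          if i ≤ j ∧ j < (array.length : Int) then some (pvVC array c0 j) else c0.get? j := by
        intro j
        have hdi : d.get? i = c0.get? i := by
          have := hd i; simpa [show ¬ (i + 1 ≤ i ∧ i < (array.length : Int)) by omega] using this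
        unfold pvStepB
        cases hci : c0.get? i with
        | some v =>
          -- i already cached in the original cache: skipped, and pvVC i = v
          have hsome : (d.get? i).isSome := by rw [hdi, hci]; rfl
          simp only [hsome, if_true]
          rw [hd j]
          by_cases hji : j = i
          · rw [hji, if_neg (show ¬ (i + 1 ≤ i ∧ i < (array.length : Int)) by omega), hci,
              if_pos (show i ≤ i ∧ i < (array.length : Int) from ⟨le_refl i, hhi⟩)]
            rw [pvVC_cached array c0 i v (by omega) hci]
          · have heq : (i + 1 ≤ j ∧ j < (array.length : Int)) ↔ (i ≤ j ∧ j < (array.length : Int)) := by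
              constructor <;> (intro hp; exact ⟨by omega, hp.2⟩)
            rw [if_congr heq rfl rfl]
        | none =>
          have hnone : (d.get? i).isSome = false := by rw [hdi, hci]; rfl
          simp only [hnone, Bool.false_eq_true, if_false]
          -- the inserted value is pvVC i
          have htake : (if i + 2 < (array.length : Int) then ((d.get? (i + 2)).getD 0) else 0) = pvVC array c0 (i + 2) := by
            by_cases h2 : i + 2 < (array.length : Int)
            · rw [if_pos h2, hd (i + 2)]
              simp [show i + 1 ≤ i + 2 ∧ i + 2 < (array.length : Int) from ⟨by omega, h2⟩]
            · rw [if_neg h2, pvVC_ge array c0 (i + 2) (by omega)]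
          have hskip : (if i + 1 < (array.length : Int) then ((d.get? (i + 1)).getD 0) else 0) = pvVC array c0 (i + 1) := by
            by_cases h1 : i + 1 < (array.length : Int)
            · rw [if_pos h1, hd (i + 1)]
              simp [show i + 1 ≤ i + 1 ∧ i + 1 < (array.length : Int) from ⟨le_refl _, h1⟩]
            · rw [if_neg h1, pvVC_ge array c0 (i + 1) (by omega)]
          have hVi := pvVC_eq array c0 i (by omega) hci
          rw [PySem.Dict.get?_insert]
          by_cases hji : j = i
          · rw [hji, if_pos rfl,
              if_pos (show i ≤ i ∧ i < (array.length : Int) from ⟨le_refl i, hhi⟩), hVi]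
            rw [htake, hskip]
            congr 1
            omega
          · rw [if_neg hji, hd j]
            have heq : (i + 1 ≤ j ∧ j < (array.length : Int)) ↔ (i ≤ j ∧ j < (array.length : Int)) := by
              constructor <;> (intro hp; exact ⟨by omega, hp.2⟩)
            rw [if_congr heq rfl rfl]
      exact ih (i - 1) (pvStepB array (array.length : Int) d i) (by omega) (by omega) (by omega)
        (by
          intro j
          rw [hstep j]
          have heq : (i ≤ j ∧ j < (array.length : Int)) ↔ (i - 1 + 1 ≤ j ∧ j < (array.length : Int)) := by
            constructor <;> (intro hp; exact ⟨by omega, hp.2⟩)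
          rw [if_congr heq rfl rfl])

theorem alt_eq_pvVC (array : List Int) (start_index : Int) (dp_cache : List (Int × Int)) :
    get_maximum_sum_from_ith_index_alt array start_index dp_cache =
      pvVC array (PySem.Dict.mk dp_cache) start_index := by
  unfold get_maximum_sum_from_ith_index_alt
  by_cases hlen : (array.length : Int) ≤ start_index
  · simp only [hlen, if_true]
    rw [pvVC_ge array _ start_index hlen]
  · simp only [hlen, if_false]
    cases hc : (PySem.Dict.mk dp_cache).get? start_index with
    | some v =>
      simp only
      rw [pvVC_cached array _ start_index v hlen hc]
    | none =>
      simp only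
      have := pvFillB_correct array (PySem.Dict.mk dp_cache) start_index
        ((array.length : Int) - start_index).toNat ((array.length : Int) - 1)
        (PySem.Dict.mk dp_cache) (by omega) (by omega) (by omega)
        (by intro j; rw [if_neg (by omega)])
      rw [this start_index, if_pos ⟨le_refl _, by omega⟩]
      rfl

-- ===== VERDICT (by name: the statement is the Claim_ definition above) =====
theorem get_maximum_sum_from_ith_index_spec : Claim_equal_get_maximum_sum_from_ith_index := by
  intro array start_index dp_cache _hdom _hpre
  unfold Spec_get_maximum_sum_from_ith_index
  rw [alt_eq_pvVC]
  unfold get_maximum_sum_from_ith_index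
  exact (pvGoA_correct array (PySem.Dict.mk dp_cache) (((array.length : Int) - start_index).toNat + 1)
    start_index (PySem.Dict.mk dp_cache) (by omega)
    (pvInv_init array (PySem.Dict.mk dp_cache))).1
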